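-- pv_equiv track=rewrite | github.com/blakeohare/crayon | Interpreter/gen/python-app/vm.py | stringFromHex
-- ===== SOURCE A (Python) =====
-- def stringFromHex(encoded):
--   encoded = encoded.upper()
--   hex = "0123456789ABCDEF"
--   output = []
--   length = len(encoded)
--   a = 0
--   b = 0
--   c = None
--   i = 0
--   while ((i + 1) < length):
--     c = "" + encoded[i]
--     a = hex.find(c)
--     if (a == -1):
--       return None
--     c = "" + encoded[(i + 1)]
--     b = hex.find(c)
--     if (b == -1):
--       return None
--     a = ((a * 16) + b)
--     output.append(chr(a))
--     i += 2
--   return "".join(output)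
-- ===== SOURCE B (Python) =====
-- HEX = "0123456789ABCDEF"
--
-- def stringFromHex(encoded):
--     up = encoded.upper()
--     n = len(up) - len(up) % 2
--     vals = []
--     for ch in up[:n]:
--         v = HEX.find(ch)
--         if v == -1:
--             return None
--         vals.append(v)
--     it = iter(vals)
--     return "".join(chr(hi * 16 + lo) for hi, lo in zip(it, it))
-- ===== Notes on version B (the rewrite author's own statement) =====
-- stated objective: alternative
-- what changed: B trims the string to its even-length prefix up front, then decodes every character to a nibble value in one validation pass, then assembles bytes from nibble pairs in a second pass, instead of A's single interleaved index-stepping while-loop that validates and assembles together.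
import Mathlib
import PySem

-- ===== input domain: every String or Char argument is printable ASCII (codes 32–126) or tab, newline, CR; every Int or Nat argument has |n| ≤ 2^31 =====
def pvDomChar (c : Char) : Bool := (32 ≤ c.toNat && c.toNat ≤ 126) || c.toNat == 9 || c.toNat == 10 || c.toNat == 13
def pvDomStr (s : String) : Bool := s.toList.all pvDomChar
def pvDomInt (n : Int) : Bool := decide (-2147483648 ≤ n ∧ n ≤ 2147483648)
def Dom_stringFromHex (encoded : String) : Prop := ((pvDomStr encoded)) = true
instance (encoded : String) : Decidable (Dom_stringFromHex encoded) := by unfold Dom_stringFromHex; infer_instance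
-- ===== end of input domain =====

-- B separates validation (one pass mapping each char of the even-length prefix to its
-- nibble value) from byte assembly (a second pass combining nibble pairs), instead of
-- A's interleaved index-stepping while-loop; same cost, different decomposition.

-- ===== PORT A =====
-- hex = "0123456789ABCDEF"
def pvHex : List Char := "0123456789ABCDEF".toList

-- the while-loop of A: i steps by 2 over the upper-cased characters; indices i, i+1
-- are in range whenever the loop body runs (i + 1 < length), so pyGetD is exact here
def pvALoop (s : List Char) (length i : Nat) (output : List Char) : Option (List Char) :=
  if i + 1 < length then
    let c : List Char := [PySem.List.pyGetD s (i : Int) ' ']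
    let a : Int := PySem.Chars.find pvHex c
    if a = -1 then none
    else
      let c : List Char := [PySem.List.pyGetD s ((i : Int) + 1) ' ']
      let b : Int := PySem.Chars.find pvHex c
      if b = -1 then none
      else pvALoop s length (i + 2) (output ++ [Char.ofNat ((a * 16 + b)).toNat])
  else some output
termination_by length - i

def stringFromHex (encoded : String) : Option String :=
  let e := PySem.Chars.upper encoded.toList
  (pvALoop e e.length 0 []).map String.ofList

-- ===== PORT B =====
-- first pass of B: each char of the even prefix to its nibble value, None on failure
def pvNibbles? : List Char → Option (List Int)
  | [] => some []
  | c :: cs =>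
    let v := PySem.Chars.find pvHex [c]
    if v = -1 then none
    else (pvNibbles? cs).map (fun vs => v :: vs)

-- second pass of B: ''.join(chr(hi*16+lo) for hi, lo in zip(it, it)) — pairs off the
-- nibble values two at a time until fewer than two remain
def pvAssemble : List Int → List Char
  | hi :: lo :: rest => Char.ofNat ((hi * 16 + lo)).toNat :: pvAssemble rest
  | _ => []

def stringFromHex_alt (encoded : String) : Option String :=
  let up := PySem.Chars.upper encoded.toList
  let n := up.length - up.length % 2
  match pvNibbles? (up.take n) with
  | none => none
  | some vals => some (String.ofList (pvAssemble vals))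

-- ===== PRECONDITION & SPEC =====
def Spec_stringFromHex (encoded : String) (out : Option String) : Prop := out = stringFromHex_alt encoded
instance (encoded : String) (out : Option String) : Decidable (Spec_stringFromHex encoded out) := by unfold Spec_stringFromHex; infer_instance

-- ===== CLAIM (what is proved, stated in full; the proofs are below) =====
def Claim_equal_stringFromHex : Prop := ∀ (encoded : String), Dom_stringFromHex encoded → Spec_stringFromHex encoded (stringFromHex encoded)

-- ===== LEMMAS AND PROOFS =====

-- B's whole pipeline on a character list
def pvBCore (t : List Char) : Option (List Char) :=
  (pvNibbles? (t.take (t.length - t.length % 2))).map pvAssemble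

lemma pvBCore_short (t : List Char) (h : t.length ≤ 1) : pvBCore t = some [] := by
  match t, h with
  | [], _ => rfl
  | [c], _ => rfl

lemma pvBCore_cons_cons (c₁ c₂ : Char) (rest : List Char) :
    pvBCore (c₁ :: c₂ :: rest) =
      (if PySem.Chars.find pvHex [c₁] = -1 then none
       else if PySem.Chars.find pvHex [c₂] = -1 then none
       else (pvBCore rest).map
         (fun cs => Char.ofNat ((PySem.Chars.find pvHex [c₁] * 16 + PySem.Chars.find pvHex [c₂])).toNat :: cs)) := by
  have hlen : (c₁ :: c₂ :: rest).length - (c₁ :: c₂ :: rest).length % 2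
      = (rest.length - rest.length % 2) + 2 := by
    simp only [List.length_cons]; omega
  simp only [pvBCore, hlen, List.take_succ_cons, pvNibbles?]
  split_ifs with h1 h2 <;> simp [Option.map_map]
  · rcases pvNibbles? (rest.take (rest.length - rest.length % 2)) with _ | vs <;> simp [pvAssemble]

lemma pvALoop_eq (s : List Char) (i : Nat) (acc : List Char) :
    pvALoop s s.length i acc = (pvBCore (s.drop i)).map (fun cs => acc ++ cs) := by
  by_cases h : i + 1 < s.length
  · have hi : i < s.length := by omega
    have hi1 : i + 1 < s.length := h
    have hdrop : s.drop i = s[i] :: s[i+1] :: s.drop (i + 2) := by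
      rw [List.drop_eq_getElem_cons hi]
      congr 1
      rw [List.drop_eq_getElem_cons hi1]
    have hg0 : PySem.List.pyGetD s (i : Int) ' ' = s[i] := by
      simp [List.getElem?_eq_getElem hi]
    have hg1 : PySem.List.pyGetD s ((i : Int) + 1) ' ' = s[i+1] := by
      rw [show ((i : Int) + 1) = ((i + 1 : Nat) : Int) by push_cast; ring,
        PySem.List.pyGetD_natCast]
      simp [List.getD, List.getElem?_eq_getElem hi1]
    rw [pvALoop]
    simp only [if_pos h, hg0, hg1, hdrop, pvBCore_cons_cons]
    split_ifs with h1 h2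
    · rfl
    · rfl
    · rw [pvALoop_eq s (i + 2) (acc ++ [Char.ofNat ((PySem.Chars.find pvHex [s[i]] * 16 + PySem.Chars.find pvHex [s[i+1]])).toNat])]
      rcases pvBCore (s.drop (i + 2)) with _ | cs <;> simp
  · rw [pvALoop]
    simp only [if_neg h]
    have : (s.drop i).length ≤ 1 := by simp; omega
    rw [pvBCore_short _ this]
    simp
termination_by s.length - i

-- ===== VERDICT (by name: the statement is the Claim_ definition above) =====
theorem stringFromHex_spec : Claim_equal_stringFromHex := by
  intro encoded _
  unfold Spec_stringFromHex
  simp only [stringFromHex, stringFromHex_alt, pvALoop_eq, List.drop_zero, pvBCore]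
  rcases pvNibbles? ((PySem.Chars.upper encoded.toList).take
      ((PySem.Chars.upper encoded.toList).length - (PySem.Chars.upper encoded.toList).length % 2)) with _ | vs <;> simp
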